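-- pv_equiv track=rewrite | github.com/juergen2025sys/NETSHIELD | scripts/netshield_common.py | sort_ips
-- ===== SOURCE A (Python) =====
-- def sort_ips(ip_list):
--     """Sortiert IPs/CIDRs numerisch (1.2.3.4 vor 10.0.0.1).
--
--     FIX SORT-FALLBACK: Bei einer einzelnen korrupten Entry fiel die
--     gesamte Liste auf lexikalischen Sort zurueck (4.7 Mio IPs waeren
--     dann "10.0.0.1" vor "2.3.4.5" → Firewall-Diffs werden riesig).
--     Jetzt: korrupte Entries werden per-Element abgefangen und an's
--     Ende sortiert, der Rest bleibt numerisch.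
--
--     Returns:
--         list[str]: Sortierte Liste.
--     """
--     def _numeric_key(e):
--         try:
--             parts = tuple(int(x) for x in e.split('/')[0].split('.'))
--             if len(parts) != 4 or any(p > 255 or p < 0 for p in parts):
--                 # Ungueltige Entry: sortiert nach hinten, lexikalisch untereinander
--                 return (1, (256, 256, 256, 256), e)
--             return (0, parts, e)
--         except (ValueError, AttributeError, TypeError):
--             return (1, (256, 256, 256, 256), str(e))
--
--     try:
--         return sorted(ip_list, key=_numeric_key)
--     except Exception:
--         # Absoluter Fallback (sollte nie triggern da _numeric_key selbst safe ist)
--         return sorted(ip_list, key=str)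
-- ===== SOURCE B (Python) =====
-- def _ipkey(e):
--     """IP/CIDR network part as a 32-bit integer, or None if not a valid dotted quad."""
--     parts = e.split('/')[0].split('.')
--     if len(parts) != 4:
--         return None
--     try:
--         nums = [int(p) for p in parts]
--     except ValueError:
--         return None
--     if any(p < 0 or p > 255 for p in nums):
--         return None
--     return ((nums[0] * 256 + nums[1]) * 256 + nums[2]) * 256 + nums[3]
--
--
-- def sort_ips(ip_list):
--     """Valid dotted quads sorted numerically first, corrupt entries sorted lexically last."""
--     valid = []
--     invalid = []
--     for e in ip_list:
--         k = _ipkey(e)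
--         if k is None:
--             invalid.append(e)
--         else:
--             valid.append((k, e))
--     valid.sort()
--     invalid.sort()
--     return [e for _, e in valid] + invalid
-- ===== Notes on version B (the rewrite author's own statement) =====
-- stated objective: faster
-- what changed: Replaces the single sort with a composite try/except 3-tuple key by a one-pass partition into valid dotted quads (keyed by the address packed into a 32-bit integer) and corrupt entries, two plain sorts (int-keyed pairs, plain strings), and a concatenation.
import Mathlib
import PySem

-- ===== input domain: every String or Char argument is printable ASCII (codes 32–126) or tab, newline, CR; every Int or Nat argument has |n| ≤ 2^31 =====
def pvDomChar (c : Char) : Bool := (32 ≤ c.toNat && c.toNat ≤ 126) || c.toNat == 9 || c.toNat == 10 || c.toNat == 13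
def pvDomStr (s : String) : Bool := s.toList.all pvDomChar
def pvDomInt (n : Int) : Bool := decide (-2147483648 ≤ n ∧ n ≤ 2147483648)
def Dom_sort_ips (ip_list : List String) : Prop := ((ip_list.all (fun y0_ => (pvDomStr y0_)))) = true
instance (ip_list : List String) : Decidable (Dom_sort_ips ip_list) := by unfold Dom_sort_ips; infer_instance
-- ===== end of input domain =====

-- B replaces A's single composite-key sort by a one-pass partition into valid/corrupt entries plus
-- two plain sorts and a concatenation (objective: alternative decomposition, same asymptotic cost).

-- ===== PORT A =====
-- A's _numeric_key returns the Python tuple (0, parts, e) for a valid dotted quad and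
-- (1, (256,256,256,256), e) otherwise (both invalid branches coincide: str(e) = e for strings, and
-- e.split never raises on a string, so the except branch fires exactly on an int() ValueError).
-- The tuple key is ported as a two-key sort (PySem.List.sorted2): the first key packs (flag, parts)
-- order-isomorphically into an Int — valid keys lie in [0, 2^32), both invalid branches share 2^32,
-- and the packing is strictly monotone for the lexicographic order on 4-tuples with entries in
-- [0,255] — the second key is A's tiebreak string e. This is exact on every input.
-- A's outer try/except fallback never triggers (the key function is total), so it is not ported.
-- e.split('/')[0].split('.') — the literal parse both Pythons share; split? is `some` since the
-- separators are non-empty, and Python's split always returns a non-empty list, so the defaults are dead.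
def pvSplitParts (e : String) : List String :=
  (PySem.Str.split? (((PySem.Str.split? e "/").getD []).headD "") ".").getD []

def pvKeyA (e : String) : Int :=
  match (pvSplitParts e).mapM PySem.Int.ofStr? with
  | none => 4294967296                 -- except ValueError: key (1, (256,256,256,256), str(e))
  | some parts =>
    if parts.length ≠ 4 ∨ parts.any (fun p => decide (p > 255) || decide (p < 0)) then
      4294967296                       -- invalid entry: key (1, (256,256,256,256), e)
    else
      match parts with                 -- key (0, parts, e): parts packed into one Int
      | [a, b, c, d] => ((a * 256 + b) * 256 + c) * 256 + d
      | _ => 0                         -- unreachable: parts.length = 4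

def sort_ips (ip_list : List String) : List String :=
  PySem.List.sorted2 ip_list pvKeyA (fun e => e)

-- ===== PORT B =====
-- _ipkey(e) from Source B: the network part packed into a 32-bit integer, or None if corrupt.
def pvIpKey? (e : String) : Option Int :=
  if (pvSplitParts e).length ≠ 4 then none
  else
    match (pvSplitParts e).mapM PySem.Int.ofStr? with
    | none => none                     -- except ValueError
    | some nums =>
      if nums.any (fun p => decide (p < 0) || decide (p > 255)) then none
      else
        match nums with
        | [a, b, c, d] => some (((a * 256 + b) * 256 + c) * 256 + d)
        | _ => none                    -- unreachable: nums.length = 4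

def sort_ips_alt (ip_list : List String) : List String :=
  -- one pass splitting into keyed valid pairs and corrupt entries
  let vi := ip_list.foldl (fun acc e =>
      match pvIpKey? e with
      | none => (acc.1, acc.2 ++ [e])
      | some k => (acc.1 ++ [(k, e)], acc.2))
    (([] : List (Int × String)), ([] : List String))
  -- valid.sort() sorts the (int, str) pairs themselves, i.e. by first then second component
  (PySem.List.sorted2 vi.1 Prod.fst Prod.snd).map Prod.snd
    ++ PySem.List.sorted vi.2 (fun e => e)

-- ===== PRECONDITION & SPEC =====
def Spec_sort_ips (ip_list : List String) (out : List String) : Prop := out = sort_ips_alt ip_list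
instance (ip_list : List String) (out : List String) : Decidable (Spec_sort_ips ip_list out) := by unfold Spec_sort_ips; infer_instance

-- ===== CLAIM (what is proved, stated in full; the proofs are below) =====
def Claim_equal_sort_ips : Prop := ∀ (ip_list : List String), Dom_sort_ips ip_list → Spec_sort_ips ip_list (sort_ips ip_list)

-- ===== LEMMAS AND PROOFS =====

-- pointwise-equal insertion predicates give the same insertion
theorem pvInsertBy_congr {α : Type} (f g : α → α → Bool) (h : ∀ a b, f a b = g a b)
    (x : α) (l : List α) : PySem.List.insertBy f x l = PySem.List.insertBy g x l := by
  induction l with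
  | nil => rfl
  | cons y ys ih => simp [PySem.List.insertBy, h, ih]

-- a two-key Python sort is the one-key sort by the lexicographic pair
theorem pvSorted2_eq_sorted_lex {α κ₁ κ₂ : Type} [LinearOrder κ₁] [LinearOrder κ₂]
    (xs : List α) (k1 : α → κ₁) (k2 : α → κ₂) :
    PySem.List.sorted2 xs k1 k2 = PySem.List.sorted xs (fun x => toLex (k1 x, k2 x)) := by
  have h1 : PySem.List.sorted2 xs k1 k2 =
      xs.foldl (fun acc x => PySem.List.insertBy
        (fun a b => decide (k1 a < k1 b) || (!decide (k1 b < k1 a) && decide (k2 a < k2 b))) x acc) [] := rfl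
  rw [h1, PySem.List.sorted_eq_foldl_insertBy]
  refine PySem.List.foldl_congr_mem _ _ _ _ (fun acc x _ => ?_)
  refine pvInsertBy_congr _ _ (fun a b => ?_) x acc
  rcases lt_trichotomy (k1 a) (k1 b) with h | h | h
  · simp [Prod.Lex.toLex_lt_toLex, h]
  · simp [Prod.Lex.toLex_lt_toLex, h]
  · simp [Prod.Lex.toLex_lt_toLex, h, not_lt_of_gt h, h.ne']

-- mapM over Option preserves length
theorem pvLength_mapM {α β : Type} (f : α → Option β) (l : List α) (l' : List β)
    (h : l.mapM f = some l') : l'.length = l.length := by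
  induction l generalizing l' with
  | nil => simp_all
  | cons x xs ih =>
    cases hx : f x <;> simp [List.mapM_cons, hx, Option.bind_eq_some_iff] at h
    obtain ⟨ys, hys, rfl⟩ := h
    simp [ih _ hys]

-- A's two out-of-range tests are the same test
theorem pvAny_comm (nums : List Int) :
    (nums.any (fun p => decide (p > 255) || decide (p < 0))) =
    (nums.any (fun p => decide (p < 0) || decide (p > 255))) := by
  refine PySem.List.any_congr_mem (fun p _ => Bool.or_comm _ _)

-- A's key agrees with B's classification (the invalid sentinel 2^32 filled in for None)
theorem pvKeyA_eq_getD (e : String) : pvKeyA e = (pvIpKey? e).getD 4294967296 := by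
  unfold pvKeyA pvIpKey?
  rcases hm : (pvSplitParts e).mapM PySem.Int.ofStr? with _ | nums
  · by_cases h4 : (pvSplitParts e).length ≠ 4 <;> simp [h4]
  · have hlen := pvLength_mapM PySem.Int.ofStr? _ nums hm
    dsimp only
    by_cases h4 : (pvSplitParts e).length = 4
    · rw [if_neg (show ¬((pvSplitParts e).length ≠ 4) from by omega)]
      by_cases hr : nums.any (fun p => decide (p < 0) || decide (p > 255))
      · rw [if_pos (show nums.length ≠ 4 ∨ (nums.any fun p => decide (p > 255) || decide (p < 0)) = true
              from Or.inr (by rw [pvAny_comm]; exact hr)), if_pos hr]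
        rfl
      · have hA : ¬(nums.length ≠ 4 ∨ (nums.any fun p => decide (p > 255) || decide (p < 0)) = true) := by
          rw [pvAny_comm]
          simp [hlen, h4, hr]
        rw [if_neg hA, if_neg hr]
        rcases nums with _ | ⟨a, _ | ⟨b, _ | ⟨c, _ | ⟨d, _ | _⟩⟩⟩⟩ <;> simp_all
    · rw [if_pos (show (pvSplitParts e).length ≠ 4 from by omega),
          if_pos (show nums.length ≠ 4 ∨ (nums.any fun p => decide (p > 255) || decide (p < 0)) = true
              from Or.inl (by omega))]
      rfl

-- a valid key is nonnegative and strictly below the invalid sentinel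
theorem pvIpKey?_lt (e : String) (k : Int) (h : pvIpKey? e = some k) :
    0 ≤ k ∧ k < 4294967296 := by
  unfold pvIpKey? at h
  by_cases h4 : (pvSplitParts e).length ≠ 4
  · rw [if_pos h4] at h; exact absurd h (by simp)
  · rw [if_neg h4] at h
    rcases hm : (pvSplitParts e).mapM PySem.Int.ofStr? with _ | nums <;> rw [hm] at h <;> dsimp only at h
    · exact absurd h (by simp)
    · by_cases hr : nums.any (fun p => decide (p < 0) || decide (p > 255))
      · rw [if_pos hr] at h; exact absurd h (by simp)
      · rw [if_neg hr] at h
        have hlen := pvLength_mapM PySem.Int.ofStr? _ nums hm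
        rcases nums with _ | ⟨a, _ | ⟨b, _ | ⟨c, _ | ⟨d, _ | _⟩⟩⟩⟩ <;> simp_all
        omega

-- the partition loop is a filter-map / filter pair
theorem pvPartition_eq (l : List String) :
    l.foldl (fun acc e =>
        match pvIpKey? e with
        | none => (acc.1, acc.2 ++ [e])
        | some k => (acc.1 ++ [(k, e)], acc.2))
      (([] : List (Int × String)), ([] : List String)) =
    ((l.filter (fun e => (pvIpKey? e).isSome)).map (fun e => ((pvIpKey? e).getD 0, e)),
     l.filter (fun e => !(pvIpKey? e).isSome)) := by
  have hstep : (fun (acc : List (Int × String) × List String) e =>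
      match pvIpKey? e with
      | none => (acc.1, acc.2 ++ [e])
      | some k => (acc.1 ++ [(k, e)], acc.2)) =
      fun acc e =>
        ((fun (v : List (Int × String)) e =>
            if (pvIpKey? e).isSome then v ++ [((pvIpKey? e).getD 0, e)] else v) acc.1 e,
         (fun (i : List String) e =>
            if !(pvIpKey? e).isSome then i ++ [e] else i) acc.2 e) := by
    funext acc e
    rcases h : pvIpKey? e with _ | k <;> simp [h]
  rw [hstep, PySem.List.foldl_prod_mk
        (f := fun v e => if (pvIpKey? e).isSome then v ++ [((pvIpKey? e).getD 0, e)] else v)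
        (g := fun i e => if !(pvIpKey? e).isSome then i ++ [e] else i)]
  rw [PySem.List.foldl_append_if (p := fun e => (pvIpKey? e).isSome)
        (f := fun e => ((pvIpKey? e).getD 0, e)),
      PySem.List.foldl_append_if_eq_filter (p := fun e => !(pvIpKey? e).isSome)]
  simp

-- the full Python key of A: (numeric key, tiebreak string), lexicographically
def pvK (e : String) : Lex (Int × String) := toLex (pvKeyA e, e)

theorem pvK_injective : Function.Injective pvK := by
  intro a b h
  have := congrArg (fun x => (ofLex x).2) h
  simpa [pvK] using this

-- A is one stable sort by the full key pvK; B is that sort split at the valid/invalid boundary.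
-- Both sides are permutations of l that are pairwise-nondecreasing under the injective key pvK,
-- hence equal.
theorem pvMain (l : List String) : sort_ips l = sort_ips_alt l := by
  unfold sort_ips sort_ips_alt
  rw [pvPartition_eq]
  dsimp only
  rw [pvSorted2_eq_sorted_lex, pvSorted2_eq_sorted_lex]
  set V := (l.filter (fun e => (pvIpKey? e).isSome)).map (fun e => ((pvIpKey? e).getD 0, e)) with hV
  set I := l.filter (fun e => !(pvIpKey? e).isSome) with hI
  have hFV : ∀ p : Int × String, p ∈ V → pvIpKey? p.2 = some p.1 := by
    intro p hp
    rw [hV] at hp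
    rcases List.mem_map.mp hp with ⟨e, he, rfl⟩
    have hs : (pvIpKey? e).isSome := (List.mem_filter.mp he).2
    rcases ho : pvIpKey? e with _ | k
    · rw [ho] at hs; simp at hs
    · simp
  have hKV : ∀ p : Int × String, p ∈ V → pvK p.2 = toLex p := by
    intro p hp
    rw [pvK, pvKeyA_eq_getD, hFV p hp]
    rfl
  have hKI : ∀ e, e ∈ I → pvKeyA e = 4294967296 := by
    intro e he
    have hnone : pvIpKey? e = none :=
      Option.not_isSome_iff_eq_none.mp (by simpa using (List.mem_filter.mp he).2)
    rw [pvKeyA_eq_getD, hnone]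
    rfl
  have hVlt : ∀ p : Int × String, p ∈ V → p.1 < 4294967296 :=
    fun p hp => (pvIpKey?_lt p.2 p.1 (hFV p hp)).2
  have hmapV : V.map Prod.snd = l.filter (fun e => (pvIpKey? e).isSome) := by
    rw [hV, List.map_map]
    simp [Function.comp_def]
  -- both sides are permutations of l
  have hpermL : (PySem.List.sorted l (fun e => toLex (pvKeyA e, e))).Perm l :=
    PySem.List.sorted_perm _ _ _
  have hpermR : ((PySem.List.sorted V (fun p => toLex (p.1, p.2))).map Prod.snd ++
      PySem.List.sorted I (fun e => e)).Perm l := by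
    refine (List.Perm.append ((PySem.List.sorted_perm V _ _).map Prod.snd)
      (PySem.List.sorted_perm I _ _)).trans ?_
    rw [hmapV, hI]
    exact List.filter_append_perm _ l
  -- both sides are pairwise-nondecreasing under pvK
  have hpwL : (PySem.List.sorted l (fun e => toLex (pvKeyA e, e))).Pairwise
      (fun a b => pvK a ≤ pvK b) := PySem.List.sorted_pairwise l pvK
  have hpwV : ((PySem.List.sorted V (fun p => toLex (p.1, p.2))).map Prod.snd).Pairwise
      (fun a b => pvK a ≤ pvK b) := by
    rw [List.pairwise_map]
    refine (PySem.List.sorted_pairwise V (fun p => toLex (p.1, p.2))).imp_of_mem ?_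
    intro p q hp hq h
    rw [PySem.List.mem_sorted] at hp hq
    rw [hKV p hp, hKV q hq]
    simpa using h
  have hpwI : (PySem.List.sorted I (fun e => e)).Pairwise (fun a b => pvK a ≤ pvK b) := by
    refine (PySem.List.sorted_pairwise I (fun e => e)).imp_of_mem ?_
    intro a b ha hb h
    rw [PySem.List.mem_sorted] at ha hb
    rw [pvK, pvK]
    exact Prod.Lex.toLex_le_toLex.mpr (Or.inr ⟨by rw [hKI a ha, hKI b hb], h⟩)
  have hcross : ∀ a ∈ (PySem.List.sorted V (fun p => toLex (p.1, p.2))).map Prod.snd,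
      ∀ b ∈ PySem.List.sorted I (fun e => e), pvK a ≤ pvK b := by
    intro a ha b hb
    rcases List.mem_map.mp ha with ⟨p, hp, rfl⟩
    rw [PySem.List.mem_sorted] at hp
    rw [PySem.List.mem_sorted] at hb
    rw [hKV p hp, pvK]
    refine Prod.Lex.toLex_le_toLex.mpr (Or.inl ?_)
    rw [hKI b hb]
    exact hVlt p hp
  have hpwR : ((PySem.List.sorted V (fun p => toLex (p.1, p.2))).map Prod.snd ++
      PySem.List.sorted I (fun e => e)).Pairwise (fun a b => pvK a ≤ pvK b) :=
    List.pairwise_append.mpr ⟨hpwV, hpwI, hcross⟩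
  exact PySem.List.eq_of_perm_of_pairwise_le_of_injective pvK pvK_injective
    (hpermL.trans hpermR.symm) hpwL hpwR

-- ===== VERDICT (by name: the statement is the Claim_ definition above) =====
theorem sort_ips_spec : Claim_equal_sort_ips := by
  intro l _
  unfold Spec_sort_ips
  exact pvMain l
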